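-- pv_equiv track=rewrite | github.com/pappubishwas/Codeforces | D_Fibonacci_Paths.py | dp
-- ===== SOURCE A (Python) =====
-- MOD = 998244353
--
-- LIM = 10**18
--
-- def dp(ei, E, W, G, memo):
--     if memo[ei] != -1:
--         return memo[ei]
--
--     a = E[ei][0]
--     b = E[ei][1]
--
--     x = W[a]
--     y = W[b]
--     z = x + y
--
--     if z > LIM:
--         memo[ei] = 0
--         return 0
--
--     s = 0
--     for nxt, idx in G[b]:
--         if W[nxt] == z:
--             s = (s + 1 + dp(idx, E, W, G, memo)) % MOD
--
--     memo[ei] = s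
--     return s
-- ===== SOURCE B (Python) =====
-- # Bottom-up reformulation: fills the memo table iteratively in decreasing
-- # endpoint-weight-sum order (the DP dependency order) instead of recursing.
-- # Same return value as the recursive version on valid inputs; like the
-- # original it mutates memo in place (it may fill entries the recursion
-- # would not have reached).
-- MOD = 998244353
--
-- LIM = 10**18
--
-- def dp(ei, E, W, G, memo):
--     if memo[ei] != -1:
--         return memo[ei]
--     order = sorted(range(len(E)), key=lambda i: -(W[E[i][0]] + W[E[i][1]]))
--     for e in order:
--         if memo[e] != -1:
--             continue
--         a, b = E[e]
--         z = W[a] + W[b]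
--         if z > LIM:
--             memo[e] = 0
--             continue
--         s = 0
--         for nxt, idx in G[b]:
--             if W[nxt] == z:
--                 s = (s + 1 + memo[idx]) % MOD
--         memo[e] = s
--     return memo[ei]
-- ===== Notes on version B (the rewrite author's own statement) =====
-- stated objective: alternative
-- what changed: Replaces the top-down memoized recursion with an iterative bottom-up pass: edge indices are sorted by decreasing endpoint-weight sum (the DP dependency order under Pre_) and the memo table is filled by a single loop with no recursion; same return value, and like A it fills memo in place (possibly more entries than A's reachable set).
-- outside the precondition, e.g. on dp(0, [(0, 1), (5, 7)], [1, 1], [[], []], [-1, -1]): A returns 0, B raises IndexError; on dp(0, [(0, 1), (1, 0)], [1, 0], [[], [(0, 1)]], [-1, -1]): A returns 1, B returns 0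
import Mathlib
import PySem

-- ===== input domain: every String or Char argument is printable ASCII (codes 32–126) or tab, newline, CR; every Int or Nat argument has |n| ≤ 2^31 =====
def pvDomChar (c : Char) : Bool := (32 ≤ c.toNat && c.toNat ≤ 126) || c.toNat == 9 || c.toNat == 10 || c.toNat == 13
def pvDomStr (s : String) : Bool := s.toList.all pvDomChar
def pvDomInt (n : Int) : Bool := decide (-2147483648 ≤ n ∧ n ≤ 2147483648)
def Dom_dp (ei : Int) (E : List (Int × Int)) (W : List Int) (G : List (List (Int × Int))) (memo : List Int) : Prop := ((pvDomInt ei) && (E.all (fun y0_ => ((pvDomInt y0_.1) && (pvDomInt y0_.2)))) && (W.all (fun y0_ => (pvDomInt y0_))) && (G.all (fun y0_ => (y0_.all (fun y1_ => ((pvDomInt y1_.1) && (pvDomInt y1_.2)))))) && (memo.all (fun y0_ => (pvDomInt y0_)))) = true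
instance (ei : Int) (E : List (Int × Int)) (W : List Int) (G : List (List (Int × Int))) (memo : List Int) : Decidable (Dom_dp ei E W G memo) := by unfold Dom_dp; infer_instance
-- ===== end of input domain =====

-- B replaces A's top-down memoized recursion with a bottom-up fill of the memo
-- table in decreasing endpoint-weight-sum order (the dependency order under Pre_);
-- equivalence is about the RETURN value (both mutate memo in Python; B may fill
-- entries A's recursion does not reach).

def pvMOD : Int := 998244353
def pvLIM : Int := 10^18
def pvFUEL : Nat := 68719476736

-- ===== PORT A =====
def dpGo (E : List (Int × Int)) (W : List Int) (G : List (List (Int × Int))) :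
    Nat → Int → List Int → Option (Int × List Int)
  | 0, _, _ => none
  | fuel+1, ei, m =>
    let v := PySem.List.pyGetD m ei 0
    if v ≠ -1 then some (v, m)
    else
      let a := (PySem.List.pyGetD E ei (0, 0)).1
      let b := (PySem.List.pyGetD E ei (0, 0)).2
      let x := PySem.List.pyGetD W a 0
      let y := PySem.List.pyGetD W b 0
      let z := x + y
      if z > pvLIM then some (0, PySem.List.pySetD m ei 0)
      else
        match (PySem.List.pyGetD G b []).foldl
          (fun acc q =>
            match acc with
            | none => none
            | some (s, m) =>
              if PySem.List.pyGetD W q.1 0 = z then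
                match dpGo E W G fuel q.2 m with
                | none => none
                | some (d, m') => some (PySem.Int.mod (s + 1 + d) pvMOD, m')
              else some (s, m)) (some (0, m)) with
        | none => none
        | some (s, m') => some (s, PySem.List.pySetD m' ei s)

def dp (ei : Int) (E : List (Int × Int)) (W : List Int) (G : List (List (Int × Int))) (memo : List Int) : Int :=
  match dpGo E W G pvFUEL ei memo with
  | some (v, _) => v
  | none => 0

-- ===== PORT B =====
def dp_alt (ei : Int) (E : List (Int × Int)) (W : List Int) (G : List (List (Int × Int))) (memo : List Int) : Int :=
  if PySem.List.pyGetD memo ei 0 ≠ -1 then PySem.List.pyGetD memo ei 0 else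
  let order := PySem.List.sorted (PySem.List.pyRange 0 (E.length : Int) 1)
    (fun i => -(PySem.List.pyGetD W (PySem.List.pyGetD E i (0, 0)).1 0 +
                PySem.List.pyGetD W (PySem.List.pyGetD E i (0, 0)).2 0)) false
  let final := order.foldl (fun m e =>
    if PySem.List.pyGetD m e 0 ≠ -1 then m
    else
      let a := (PySem.List.pyGetD E e (0, 0)).1
      let b := (PySem.List.pyGetD E e (0, 0)).2
      let z := PySem.List.pyGetD W a 0 + PySem.List.pyGetD W b 0
      if z > pvLIM then PySem.List.pySetD m e 0
      else
        let s := (PySem.List.pyGetD G b []).foldl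
          (fun s q =>
            if PySem.List.pyGetD W q.1 0 = z then
              PySem.Int.mod (s + 1 + PySem.List.pyGetD m q.2 0) pvMOD
            else s) 0
        PySem.List.pySetD m e s) memo
  PySem.List.pyGetD final ei 0

-- ===== PRECONDITION & SPEC =====
-- weight sum of the edge with (python) index e
def zE (E : List (Int × Int)) (W : List Int) (e : Int) : Int :=
  PySem.List.pyGetD W (PySem.List.pyGetD E e (0, 0)).1 0 +
  PySem.List.pyGetD W (PySem.List.pyGetD E e (0, 0)).2 0

-- Pre_ admits every already-memoized query (both programs just return memo[ei]),
-- and otherwise the inputs on which A's recursion is well defined and B's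
-- full-table pass is meaningful: all indices stored anywhere in E/G python-valid
-- (A validates only the reachable part, B touches every edge), and every
-- weight-matching adjacency step leads to an edge of strictly larger weight sum
-- (otherwise A's recursion can run forever, and the bottom-up order is not a
-- dependency order).
def Pre_dp (ei : Int) (E : List (Int × Int)) (W : List Int) (G : List (List (Int × Int))) (memo : List Int) : Prop :=
  PySem.Raise.InRange memo.length ei ∧
  (PySem.List.pyGetD memo ei 0 ≠ -1 ∨
  (PySem.Raise.InRange E.length ei ∧
  memo.length = E.length ∧
  G.length = W.length ∧
  (∀ p ∈ E, PySem.Raise.InRange W.length p.1 ∧ PySem.Raise.InRange W.length p.2) ∧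
  (∀ g ∈ G, ∀ q ∈ g, PySem.Raise.InRange W.length q.1 ∧ PySem.Raise.InRange E.length q.2) ∧
  (∀ p ∈ E, ∀ q ∈ PySem.List.pyGetD G p.2 [],
     PySem.List.pyGetD W q.1 0 = PySem.List.pyGetD W p.1 0 + PySem.List.pyGetD W p.2 0 →
     zE E W q.2 > PySem.List.pyGetD W p.1 0 + PySem.List.pyGetD W p.2 0)))
instance (ei : Int) (E : List (Int × Int)) (W : List Int) (G : List (List (Int × Int))) (memo : List Int) : Decidable (Pre_dp ei E W G memo) := by unfold Pre_dp; infer_instance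

def pvWitness_dp : Int × (List (Int × Int)) × List Int × (List (List (Int × Int))) × List Int :=
  (0, [(0, 1)], [1, 2], [[], []], [-1])

def Spec_dp (ei : Int) (E : List (Int × Int)) (W : List Int) (G : List (List (Int × Int))) (memo : List Int) (out : Int) : Prop := out = dp_alt ei E W G memo
instance (ei : Int) (E : List (Int × Int)) (W : List Int) (G : List (List (Int × Int))) (memo : List Int) (out : Int) : Decidable (Spec_dp ei E W G memo out) := by unfold Spec_dp; infer_instance

-- ===== CLAIM (what is proved, stated in full; the proofs are below) =====
def Claim_equal_dp : Prop := ∀ (ei : Int) (E : List (Int × Int)) (W : List Int) (G : List (List (Int × Int))) (memo : List Int), Dom_dp ei E W G memo → Pre_dp ei E W G memo → Spec_dp ei E W G memo (dp ei E W G memo)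

-- ===== LEMMAS AND PROOFS =====

-- the fuel-free specification value of the recursion, defined by its own fueled recursion
def pvPure (E : List (Int × Int)) (W : List Int) (G : List (List (Int × Int))) (m0 : List Int) :
    Nat → Int → Option Int
  | 0, _ => none
  | f+1, e =>
    let v := PySem.List.pyGetD m0 e 0
    if v ≠ -1 then some v
    else if zE E W e > pvLIM then some 0
    else (PySem.List.pyGetD G (PySem.List.pyGetD E e (0, 0)).2 []).foldl
      (fun acc q =>
        acc.bind fun s =>
          if PySem.List.pyGetD W q.1 0 = zE E W e then
            (pvPure E W G m0 f q.2).map fun d => PySem.Int.mod (s + 1 + d) pvMOD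
          else some s) (some 0)

def pvValue (E : List (Int × Int)) (W : List Int) (G : List (List (Int × Int))) (m0 : List Int) (e : Int) : Int :=
  (pvPure E W G m0 pvFUEL e).getD 0

-- remaining fuel needed at an edge: decreases along matching adjacency steps
def pvNeed (E : List (Int × Int)) (W : List Int) (e : Int) : Nat := (17179869184 - zE E W e).toNat

-- normalized (nonnegative) python index
def pvPos (n : Nat) (i : Int) : Nat := if 0 ≤ i then i.toNat else n - (-i).toNat

-- memo tables whose entries are either the original entry or the spec value
def pvGood (E : List (Int × Int)) (W : List Int) (G : List (List (Int × Int))) (m0 m : List Int) : Prop :=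
  m.length = m0.length ∧
  ∀ k : Nat, k < m0.length → m.getD k 0 = m0.getD k 0 ∨ m.getD k 0 = pvValue E W G m0 (k : Int)

theorem pvPos_lt (n : Nat) (i : Int) (h : PySem.Raise.InRange n i) : pvPos n i < n := by
  obtain ⟨h1, h2⟩ := h
  unfold pvPos
  split <;> omega

theorem pv_getD_py {α : Type} (xs : List α) (i : Int) (d : α)
    (h : PySem.Raise.InRange xs.length i) :
    PySem.List.pyGetD xs i d = xs.getD (pvPos xs.length i) d := by
  obtain ⟨h1, h2⟩ := h
  simp only [PySem.List.pyGetD, PySem.List.pyGet?, PySem.List.pyIdx?, pvPos]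
  split <;> simp [List.getD]

theorem pv_setD_py {α : Type} (xs : List α) (i : Int) (v : α)
    (h : PySem.Raise.InRange xs.length i) :
    PySem.List.pySetD xs i v = xs.set (pvPos xs.length i) v := by
  obtain ⟨h1, h2⟩ := h
  simp only [PySem.List.pySetD, PySem.List.pySet?, PySem.List.pyIdx?, pvPos]
  split <;> simp

theorem pv_getD_norm {α : Type} (xs : List α) (n : Nat) (i : Int) (d : α)
    (hl : xs.length = n) (h : PySem.Raise.InRange n i) :
    PySem.List.pyGetD xs i d = PySem.List.pyGetD xs ((pvPos n i : Nat) : Int) d := by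
  subst hl
  rw [pv_getD_py xs i d h, PySem.List.pyGetD_natCast]

theorem zE_norm (E : List (Int × Int)) (W : List Int) (e : Int)
    (h : PySem.Raise.InRange E.length e) :
    zE E W e = zE E W ((pvPos E.length e : Nat) : Int) := by
  unfold zE
  rw [pv_getD_norm E E.length e (0,0) rfl h]

theorem pvPure_norm (E : List (Int × Int)) (W : List Int) (G : List (List (Int × Int))) (m0 : List Int)
    (hm : m0.length = E.length) (f : Nat) (e : Int) (h : PySem.Raise.InRange E.length e) :
    pvPure E W G m0 f e = pvPure E W G m0 f ((pvPos E.length e : Nat) : Int) := by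
  cases f with
  | zero => rfl
  | succ f =>
    simp only [pvPure]
    rw [← pv_getD_norm m0 E.length e 0 hm h, ← pv_getD_norm E E.length e (0,0) rfl h,
        ← zE_norm E W e h]

theorem pvValue_norm (E : List (Int × Int)) (W : List Int) (G : List (List (Int × Int))) (m0 : List Int)
    (hm : m0.length = E.length) (e : Int) (h : PySem.Raise.InRange E.length e) :
    pvValue E W G m0 e = pvValue E W G m0 ((pvPos E.length e : Nat) : Int) := by
  unfold pvValue
  rw [pvPure_norm E W G m0 hm pvFUEL e h]

-- generic option-threading fold lemmas
theorem pv_foldl_none {α β : Type} (l : List α) (st : Option β → α → Option β)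
    (h : ∀ q, st none q = none) : l.foldl st none = none := by
  induction l with
  | nil => rfl
  | cons q l ih => simp [h, ih]

theorem pv_foldl_mono {α β : Type} (l : List α) (st1 st2 : Option β → α → Option β)
    (h1 : ∀ q, st1 none q = none) (h2 : ∀ q, st2 none q = none)
    (hstep : ∀ s q v, q ∈ l → st1 (some s) q = some v → st2 (some s) q = some v) :
    ∀ s0 v, l.foldl st1 (some s0) = some v → l.foldl st2 (some s0) = some v := by
  induction l with
  | nil => intro s0 v h; simpa using h
  | cons q l ih =>
    intro s0 v h
    simp only [List.foldl_cons] at h ⊢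
    rcases hq : st1 (some s0) q with _ | s1
    · rw [hq, pv_foldl_none l st1 h1] at h; exact absurd h (by simp)
    · rw [hq] at h
      rw [hstep s0 q s1 (by simp) hq]
      exact ih (fun s q v hm => hstep s q v (by simp [hm])) s1 v h

theorem pv_foldl_eval {α : Type} (l : List α) (st : Option Int → α → Option Int) (g : Int → α → Int)
    (h : ∀ s q, q ∈ l → st (some s) q = some (g s q)) :
    ∀ s0, l.foldl st (some s0) = some (l.foldl g s0) := by
  induction l with
  | nil => intro s0; rfl
  | cons q l ih =>
    intro s0
    simp only [List.foldl_cons]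
    rw [h s0 q (by simp)]
    exact ih (fun s q hm => h s q (by simp [hm])) (g s0 q)

theorem pvPure_succ (E : List (Int × Int)) (W : List Int) (G : List (List (Int × Int))) (m0 : List Int)
    (f : Nat) (e : Int) :
    pvPure E W G m0 (f + 1) e =
      (if PySem.List.pyGetD m0 e 0 ≠ -1 then some (PySem.List.pyGetD m0 e 0)
       else if zE E W e > pvLIM then some 0
       else (PySem.List.pyGetD G (PySem.List.pyGetD E e (0, 0)).2 []).foldl
         (fun acc q =>
           acc.bind fun s =>
             if PySem.List.pyGetD W q.1 0 = zE E W e then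
               (pvPure E W G m0 f q.2).map fun d => PySem.Int.mod (s + 1 + d) pvMOD
             else some s) (some 0)) := by
  rw [pvPure]

theorem pvPure_mono (E : List (Int × Int)) (W : List Int) (G : List (List (Int × Int))) (m0 : List Int) :
    ∀ (f : Nat) (e : Int) (v : Int), pvPure E W G m0 f e = some v → pvPure E W G m0 (f + 1) e = some v := by
  intro f
  induction f with
  | zero => intro e v h; exact absurd h (by simp [pvPure])
  | succ f ih =>
    intro e v h
    rw [pvPure_succ] at h ⊢
    by_cases h1 : PySem.List.pyGetD m0 e 0 ≠ -1
    · rw [if_pos h1] at h ⊢; exact h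
    · rw [if_neg h1] at h ⊢
      by_cases h2 : zE E W e > pvLIM
      · rw [if_pos h2] at h ⊢; exact h
      · rw [if_neg h2] at h ⊢
        refine pv_foldl_mono _ _ _ ?_ ?_ ?_ 0 v h
        · intro q; rfl
        · intro q; rfl
        · intro s q w _ hst
          simp only [Option.bind_some] at hst ⊢
          by_cases hc : PySem.List.pyGetD W q.1 0 = zE E W e
          · rw [if_pos hc] at hst ⊢
            rcases hp : pvPure E W G m0 f q.2 with _ | d
            · rw [hp] at hst; exact absurd hst (by simp)
            · rw [hp] at hst
              rw [ih q.2 d hp]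
              exact hst
          · rw [if_neg hc] at hst ⊢; exact hst

theorem pv_foldl_isSome {α : Type} (l : List α) (st : Option Int → α → Option Int)
    (hnone : ∀ q, st none q = none)
    (h : ∀ s q, q ∈ l → (st (some s) q).isSome) : ∀ s0, (l.foldl st (some s0)).isSome := by
  induction l with
  | nil => intro s0; rfl
  | cons q l ih =>
    intro s0
    simp only [List.foldl_cons]
    rcases hq : st (some s0) q with _ | s1
    · have := h s0 q (by simp)
      rw [hq] at this; exact absurd this (by simp)
    · exact ih (fun s q hm => h s q (List.mem_cons_of_mem _ hm)) s1

theorem pv_wAt_bound (W : List Int) (i : Int)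
    (hWb : ∀ w ∈ W, -2147483648 ≤ w ∧ w ≤ 2147483648)
    (hi : PySem.Raise.InRange W.length i) :
    -2147483648 ≤ PySem.List.pyGetD W i 0 ∧ PySem.List.pyGetD W i 0 ≤ 2147483648 :=
  hWb _ (PySem.List.pyGetD_mem W 0 hi)

theorem zE_bound (E : List (Int × Int)) (W : List Int)
    (hWb : ∀ w ∈ W, -2147483648 ≤ w ∧ w ≤ 2147483648)
    (hE : ∀ p ∈ E, PySem.Raise.InRange W.length p.1 ∧ PySem.Raise.InRange W.length p.2)
    (e : Int) (he : PySem.Raise.InRange E.length e) :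
    -4294967296 ≤ zE E W e ∧ zE E W e ≤ 4294967296 := by
  have hp := PySem.List.pyGetD_mem E (0, 0) he
  obtain ⟨h1, h2⟩ := hE _ hp
  have w1 := pv_wAt_bound W _ hWb h1
  have w2 := pv_wAt_bound W _ hWb h2
  unfold zE
  omega

theorem pvNeed_bound (E : List (Int × Int)) (W : List Int)
    (hWb : ∀ w ∈ W, -2147483648 ≤ w ∧ w ≤ 2147483648)
    (hE : ∀ p ∈ E, PySem.Raise.InRange W.length p.1 ∧ PySem.Raise.InRange W.length p.2)
    (e : Int) (he : PySem.Raise.InRange E.length e) :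
    pvNeed E W e < 34359738368 := by
  have := zE_bound E W hWb hE e he
  unfold pvNeed
  omega

theorem pvNeed_lt (E : List (Int × Int)) (W : List Int) (e j : Int)
    (hz : zE E W j > zE E W e) (hlo : -4294967296 ≤ zE E W e) (hhi : zE E W e ≤ 4294967296) :
    pvNeed E W j < pvNeed E W e := by
  unfold pvNeed
  omega

theorem pv_child_facts (E : List (Int × Int)) (W : List Int) (G : List (List (Int × Int)))
    (hGW : G.length = W.length)
    (hE : ∀ p ∈ E, PySem.Raise.InRange W.length p.1 ∧ PySem.Raise.InRange W.length p.2)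
    (hG : ∀ g ∈ G, ∀ q ∈ g, PySem.Raise.InRange W.length q.1 ∧ PySem.Raise.InRange E.length q.2)
    (hM : ∀ p ∈ E, ∀ q ∈ PySem.List.pyGetD G p.2 [],
      PySem.List.pyGetD W q.1 0 = PySem.List.pyGetD W p.1 0 + PySem.List.pyGetD W p.2 0 →
      zE E W q.2 > PySem.List.pyGetD W p.1 0 + PySem.List.pyGetD W p.2 0)
    (e : Int) (he : PySem.Raise.InRange E.length e)
    (q : Int × Int) (hq : q ∈ PySem.List.pyGetD G (PySem.List.pyGetD E e (0, 0)).2 []) :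
    PySem.Raise.InRange W.length q.1 ∧ PySem.Raise.InRange E.length q.2 ∧
      (PySem.List.pyGetD W q.1 0 = zE E W e → zE E W q.2 > zE E W e) := by
  have hp := PySem.List.pyGetD_mem E (0, 0) he
  obtain ⟨h1, h2⟩ := hE _ hp
  have h2' : PySem.Raise.InRange G.length (PySem.List.pyGetD E e (0, 0)).2 := by
    rw [hGW]; exact h2
  have hgmem := PySem.List.pyGetD_mem G ([] : List (Int × Int)) h2'
  obtain ⟨hq1, hq2⟩ := hG _ hgmem q hq
  refine ⟨hq1, hq2, ?_⟩
  intro hmatch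
  exact hM _ hp q hq hmatch

theorem pvPure_suff (E : List (Int × Int)) (W : List Int) (G : List (List (Int × Int))) (m0 : List Int)
    (hGW : G.length = W.length)
    (hE : ∀ p ∈ E, PySem.Raise.InRange W.length p.1 ∧ PySem.Raise.InRange W.length p.2)
    (hG : ∀ g ∈ G, ∀ q ∈ g, PySem.Raise.InRange W.length q.1 ∧ PySem.Raise.InRange E.length q.2)
    (hM : ∀ p ∈ E, ∀ q ∈ PySem.List.pyGetD G p.2 [],
      PySem.List.pyGetD W q.1 0 = PySem.List.pyGetD W p.1 0 + PySem.List.pyGetD W p.2 0 →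
      zE E W q.2 > PySem.List.pyGetD W p.1 0 + PySem.List.pyGetD W p.2 0)
    (hWb : ∀ w ∈ W, -2147483648 ≤ w ∧ w ≤ 2147483648) :
    ∀ (f : Nat) (e : Int), PySem.Raise.InRange E.length e → pvNeed E W e < f →
      (pvPure E W G m0 f e).isSome := by
  intro f
  induction f with
  | zero => intro e he hf; omega
  | succ f ih =>
    intro e he hf
    rw [pvPure_succ]
    by_cases h1 : PySem.List.pyGetD m0 e 0 ≠ -1
    · rw [if_pos h1]; rfl
    · rw [if_neg h1]
      by_cases h2 : zE E W e > pvLIM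
      · rw [if_pos h2]; rfl
      · rw [if_neg h2]
        refine pv_foldl_isSome _ _ (fun q => rfl) ?_ 0
        intro s q hq
        obtain ⟨hq1, hq2, hq3⟩ := pv_child_facts E W G hGW hE hG hM e he q hq
        simp only [Option.bind_some]
        by_cases hc : PySem.List.pyGetD W q.1 0 = zE E W e
        · rw [if_pos hc]
          have hneed : pvNeed E W q.2 < f := by
            have hzlt := hq3 hc
            have hlo := (zE_bound E W hWb hE e he).1
            have hhi := (zE_bound E W hWb hE e he).2
            have := pvNeed_lt E W e q.2 hzlt hlo hhi
            omega
          have := ih q.2 hq2 hneed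
          rcases hp : pvPure E W G m0 f q.2 with _ | d
          · rw [hp] at this; exact absurd this (by simp)
          · rfl
        · rw [if_neg hc]; rfl

theorem pvValue_rec (E : List (Int × Int)) (W : List Int) (G : List (List (Int × Int))) (m0 : List Int)
    (hGW : G.length = W.length)
    (hE : ∀ p ∈ E, PySem.Raise.InRange W.length p.1 ∧ PySem.Raise.InRange W.length p.2)
    (hG : ∀ g ∈ G, ∀ q ∈ g, PySem.Raise.InRange W.length q.1 ∧ PySem.Raise.InRange E.length q.2)
    (hM : ∀ p ∈ E, ∀ q ∈ PySem.List.pyGetD G p.2 [],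
      PySem.List.pyGetD W q.1 0 = PySem.List.pyGetD W p.1 0 + PySem.List.pyGetD W p.2 0 →
      zE E W q.2 > PySem.List.pyGetD W p.1 0 + PySem.List.pyGetD W p.2 0)
    (hWb : ∀ w ∈ W, -2147483648 ≤ w ∧ w ≤ 2147483648)
    (e : Int) (he : PySem.Raise.InRange E.length e) :
    pvValue E W G m0 e =
      if PySem.List.pyGetD m0 e 0 ≠ -1 then PySem.List.pyGetD m0 e 0
      else if zE E W e > pvLIM then 0
      else (PySem.List.pyGetD G (PySem.List.pyGetD E e (0, 0)).2 []).foldl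
        (fun s q =>
          if PySem.List.pyGetD W q.1 0 = zE E W e then
            PySem.Int.mod (s + 1 + pvValue E W G m0 q.2) pvMOD
          else s) 0 := by
  unfold pvValue
  have hF : pvFUEL = 68719476735 + 1 := by norm_num [pvFUEL]
  rw [hF, pvPure_succ]
  by_cases h1 : PySem.List.pyGetD m0 e 0 ≠ -1
  · rw [if_pos h1, if_pos h1]; rfl
  · rw [if_neg h1, if_neg h1]
    by_cases h2 : zE E W e > pvLIM
    · rw [if_pos h2, if_pos h2]; rfl
    · rw [if_neg h2, if_neg h2]
      rw [pv_foldl_eval _ _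
        (fun s q =>
          if PySem.List.pyGetD W q.1 0 = zE E W e then
            PySem.Int.mod (s + 1 + (pvPure E W G m0 pvFUEL q.2).getD 0) pvMOD
          else s) ?_ 0]
      · rfl
      · intro s q hq
        obtain ⟨hq1, hq2, hq3⟩ := pv_child_facts E W G hGW hE hG hM e he q hq
        simp only [Option.bind_some]
        by_cases hc : PySem.List.pyGetD W q.1 0 = zE E W e
        · rw [if_pos hc, if_pos hc]
          have hneed : pvNeed E W q.2 < 68719476735 := by
            have := pvNeed_bound E W hWb hE q.2 hq2
            omega
          have hsome := pvPure_suff E W G m0 hGW hE hG hM hWb 68719476735 q.2 hq2 hneed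
          rcases hp : pvPure E W G m0 68719476735 q.2 with _ | d
          · rw [hp] at hsome; exact absurd hsome (by simp)
          · have hfull : pvPure E W G m0 pvFUEL q.2 = some d := by
              rw [hF]; exact pvPure_mono E W G m0 _ _ _ hp
            rw [hfull]
            rfl
        · rw [if_neg hc, if_neg hc]

theorem pv_fold_nonneg {α : Type} (l : List α) (step : Int → α → Int)
    (h : ∀ s q, 0 ≤ s → 0 ≤ step s q) : ∀ s, 0 ≤ s → 0 ≤ l.foldl step s := by
  induction l with
  | nil => intro s hs; simpa using hs
  | cons q l ih =>
    intro s hs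
    simp only [List.foldl_cons]
    exact ih (step s q) (h s q hs)

theorem pvValue_ne_neg_one (E : List (Int × Int)) (W : List Int) (G : List (List (Int × Int))) (m0 : List Int)
    (hGW : G.length = W.length)
    (hE : ∀ p ∈ E, PySem.Raise.InRange W.length p.1 ∧ PySem.Raise.InRange W.length p.2)
    (hG : ∀ g ∈ G, ∀ q ∈ g, PySem.Raise.InRange W.length q.1 ∧ PySem.Raise.InRange E.length q.2)
    (hM : ∀ p ∈ E, ∀ q ∈ PySem.List.pyGetD G p.2 [],
      PySem.List.pyGetD W q.1 0 = PySem.List.pyGetD W p.1 0 + PySem.List.pyGetD W p.2 0 →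
      zE E W q.2 > PySem.List.pyGetD W p.1 0 + PySem.List.pyGetD W p.2 0)
    (hWb : ∀ w ∈ W, -2147483648 ≤ w ∧ w ≤ 2147483648)
    (e : Int) (he : PySem.Raise.InRange E.length e) :
    pvValue E W G m0 e ≠ -1 := by
  rw [pvValue_rec E W G m0 hGW hE hG hM hWb e he]
  by_cases h1 : PySem.List.pyGetD m0 e 0 ≠ -1
  · rw [if_pos h1]; exact h1
  · rw [if_neg h1]
    by_cases h2 : zE E W e > pvLIM
    · rw [if_pos h2]; omega
    · rw [if_neg h2]
      have : (0 : Int) ≤ (PySem.List.pyGetD G (PySem.List.pyGetD E e (0, 0)).2 []).foldl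
        (fun s q =>
          if PySem.List.pyGetD W q.1 0 = zE E W e then
            PySem.Int.mod (s + 1 + pvValue E W G m0 q.2) pvMOD
          else s) 0 := by
        refine pv_fold_nonneg _ _ ?_ 0 le_rfl
        intro s q hs
        by_cases hc : PySem.List.pyGetD W q.1 0 = zE E W e
        · rw [if_pos hc]
          exact PySem.Int.mod_nonneg _ (by norm_num [pvMOD])
        · rw [if_neg hc]; exact hs
      omega

theorem pvGood_entry (E : List (Int × Int)) (W : List Int) (G : List (List (Int × Int))) (m0 m : List Int)
    (hGW : G.length = W.length)
    (hE : ∀ p ∈ E, PySem.Raise.InRange W.length p.1 ∧ PySem.Raise.InRange W.length p.2)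
    (hG : ∀ g ∈ G, ∀ q ∈ g, PySem.Raise.InRange W.length q.1 ∧ PySem.Raise.InRange E.length q.2)
    (hM : ∀ p ∈ E, ∀ q ∈ PySem.List.pyGetD G p.2 [],
      PySem.List.pyGetD W q.1 0 = PySem.List.pyGetD W p.1 0 + PySem.List.pyGetD W p.2 0 →
      zE E W q.2 > PySem.List.pyGetD W p.1 0 + PySem.List.pyGetD W p.2 0)
    (hWb : ∀ w ∈ W, -2147483648 ≤ w ∧ w ≤ 2147483648)
    (hmE : m0.length = E.length)
    (hg : pvGood E W G m0 m) (k : Nat) (hk : k < E.length) (hne : m.getD k 0 ≠ -1) :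
    m.getD k 0 = pvValue E W G m0 (k : Int) := by
  rcases hg.2 k (by omega) with h | h
  · have hk' : PySem.Raise.InRange E.length ((k : Nat) : Int) := by
      constructor <;> [omega; exact_mod_cast hk]
    have hrec := pvValue_rec E W G m0 hGW hE hG hM hWb ((k : Nat) : Int) hk'
    have hb : PySem.List.pyGetD m0 ((k : Nat) : Int) 0 = m0.getD k 0 := by
      simp [PySem.List.pyGetD_natCast]
    rw [hb] at hrec
    rw [if_pos (by rw [← h]; exact hne)] at hrec
    rw [h, ← hrec]
  · exact h

theorem pvGood_set (E : List (Int × Int)) (W : List Int) (G : List (List (Int × Int))) (m0 m : List Int)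
    (hmE : m0.length = E.length)
    (hg : pvGood E W G m0 m) (k : Nat) (hk : k < E.length) (v : Int)
    (hv : v = pvValue E W G m0 (k : Int)) :
    pvGood E W G m0 (m.set k v) := by
  obtain ⟨hl, he⟩ := hg
  refine ⟨by simp [hl], ?_⟩
  intro k' hk'
  by_cases hkk : k = k'
  · subst hkk
    right
    rw [List.getD_eq_getElem?_getD, List.getElem?_set, if_pos rfl, if_pos (by omega)]
    simpa using hv
  · rw [List.getD_eq_getElem?_getD, List.getElem?_set, if_neg hkk, ← List.getD_eq_getElem?_getD]
    exact he k' hk'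

theorem dpGo_succ (E : List (Int × Int)) (W : List Int) (G : List (List (Int × Int)))
    (f : Nat) (e : Int) (m : List Int) :
    dpGo E W G (f + 1) e m =
      (if PySem.List.pyGetD m e 0 ≠ -1 then some (PySem.List.pyGetD m e 0, m)
       else if zE E W e > pvLIM then some (0, PySem.List.pySetD m e 0)
       else
         match (PySem.List.pyGetD G (PySem.List.pyGetD E e (0, 0)).2 []).foldl
           (fun acc q =>
             match acc with
             | none => none
             | some (s, m) =>
               if PySem.List.pyGetD W q.1 0 = zE E W e then
                 match dpGo E W G f q.2 m with
                 | none => none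
                 | some (d, m') => some (PySem.Int.mod (s + 1 + d) pvMOD, m')
               else some (s, m)) (some (0, m)) with
         | none => none
         | some (s, m') => some (s, PySem.List.pySetD m' e s)) := by
  rw [dpGo]
  rfl

theorem dpGo_main (E : List (Int × Int)) (W : List Int) (G : List (List (Int × Int))) (m0 : List Int)
    (hGW : G.length = W.length)
    (hE : ∀ p ∈ E, PySem.Raise.InRange W.length p.1 ∧ PySem.Raise.InRange W.length p.2)
    (hG : ∀ g ∈ G, ∀ q ∈ g, PySem.Raise.InRange W.length q.1 ∧ PySem.Raise.InRange E.length q.2)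
    (hM : ∀ p ∈ E, ∀ q ∈ PySem.List.pyGetD G p.2 [],
      PySem.List.pyGetD W q.1 0 = PySem.List.pyGetD W p.1 0 + PySem.List.pyGetD W p.2 0 →
      zE E W q.2 > PySem.List.pyGetD W p.1 0 + PySem.List.pyGetD W p.2 0)
    (hWb : ∀ w ∈ W, -2147483648 ≤ w ∧ w ≤ 2147483648)
    (hmE : m0.length = E.length) :
    ∀ (f : Nat) (e : Int) (m : List Int),
      PySem.Raise.InRange E.length e → pvNeed E W e < f → pvGood E W G m0 m →
      ∃ m', dpGo E W G f e m = some (pvValue E W G m0 e, m') ∧ pvGood E W G m0 m' := by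
  intro f
  induction f with
  | zero => intro e m he hf hg; omega
  | succ f ih =>
    intro e m he hf hg
    have hml : m.length = E.length := hg.1.trans hmE
    have hpos : pvPos E.length e < E.length := pvPos_lt _ _ he
    have hbm : PySem.List.pyGetD m e 0 = m.getD (pvPos E.length e) 0 := by
      rw [pv_getD_py m e 0 (by rw [hml]; exact he), hml]
    have hnorm : pvValue E W G m0 ((pvPos E.length e : Nat) : Int) = pvValue E W G m0 e :=
      (pvValue_norm E W G m0 hmE e he).symm
    rw [dpGo_succ]
    by_cases hv : PySem.List.pyGetD m e 0 ≠ -1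
    · rw [if_pos hv]
      refine ⟨m, ?_, hg⟩
      have := pvGood_entry E W G m0 m hGW hE hG hM hWb hmE hg (pvPos E.length e) hpos
        (by rw [← hbm]; exact hv)
      rw [hbm, this, hnorm]
    · rw [if_neg hv]
      push Not at hv
      have hm0e : PySem.List.pyGetD m0 e 0 = -1 := by
        have hmge : m.getD (pvPos E.length e) 0 = -1 := by rw [← hbm]; exact hv
        rcases hg.2 (pvPos E.length e) (by omega) with h | h
        · rw [pv_getD_py m0 e 0 (by rw [hmE]; exact he), hmE, ← h]
          exact hmge
        · exfalso
          have hIR : PySem.Raise.InRange E.length ((pvPos E.length e : Nat) : Int) := by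
            constructor <;> [omega; exact_mod_cast hpos]
          exact pvValue_ne_neg_one E W G m0 hGW hE hG hM hWb _ hIR (by rw [← h]; exact hmge)
      have hrec := pvValue_rec E W G m0 hGW hE hG hM hWb e he
      rw [if_neg (by simpa using hm0e)] at hrec
      by_cases hz : zE E W e > pvLIM
      · rw [if_pos hz]
        rw [if_pos hz] at hrec
        refine ⟨PySem.List.pySetD m e 0, ?_, ?_⟩
        · rw [hrec]
        · rw [pv_setD_py m e 0 (by rw [hml]; exact he), hml]
          exact pvGood_set E W G m0 m hmE hg _ hpos 0 (by rw [hnorm, hrec])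
      · rw [if_neg hz]
        rw [if_neg hz] at hrec
        have LOOP : ∀ (l : List (Int × Int)),
            (∀ q ∈ l, q ∈ PySem.List.pyGetD G (PySem.List.pyGetD E e (0, 0)).2 []) →
            ∀ (s : Int) (mm : List Int), pvGood E W G m0 mm →
            ∃ mm', l.foldl
              (fun acc q =>
                match acc with
                | none => none
                | some (s, m) =>
                  if PySem.List.pyGetD W q.1 0 = zE E W e then
                    match dpGo E W G f q.2 m with
                    | none => none
                    | some (d, m') => some (PySem.Int.mod (s + 1 + d) pvMOD, m')
                  else some (s, m)) (some (s, mm)) =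
              some (l.foldl
                (fun s q =>
                  if PySem.List.pyGetD W q.1 0 = zE E W e then
                    PySem.Int.mod (s + 1 + pvValue E W G m0 q.2) pvMOD
                  else s) s, mm') ∧ pvGood E W G m0 mm' := by
          intro l
          induction l with
          | nil => intro _ s mm hgm; exact ⟨mm, rfl, hgm⟩
          | cons q l ihl =>
            intro hsub s mm hgm
            have hqmem := hsub q (by simp)
            obtain ⟨hq1, hq2, hq3⟩ := pv_child_facts E W G hGW hE hG hM e he q hqmem
            simp only [List.foldl_cons]
            by_cases hc : PySem.List.pyGetD W q.1 0 = zE E W e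
            · have hneed : pvNeed E W q.2 < f := by
                have hzlt := hq3 hc
                have hb := zE_bound E W hWb hE e he
                have := pvNeed_lt E W e q.2 hzlt hb.1 hb.2
                omega
              obtain ⟨m1, hm1, hg1⟩ := ih q.2 mm hq2 hneed hgm
              rw [if_pos hc, hm1]
              rw [if_pos hc]
              exact ihl (fun q' hq' => hsub q' (List.mem_cons_of_mem _ hq')) _ m1 hg1
            · rw [if_neg hc, if_neg hc]
              exact ihl (fun q' hq' => hsub q' (List.mem_cons_of_mem _ hq')) s mm hgm
        obtain ⟨m'', hfold, hg''⟩ := LOOP _ (fun q hq => hq) 0 m hg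
        rw [hfold, ← hrec]
        have hml'' : m''.length = E.length := hg''.1.trans hmE
        refine ⟨_, rfl, ?_⟩
        rw [pv_setD_py m'' e _ (by rw [hml'']; exact he), hml'']
        exact pvGood_set E W G m0 m'' hmE hg'' _ hpos _ (by rw [hnorm])

-- zeta-expanded form of dp_alt's loop body (definitionally equal to it)
def pvStepB (E : List (Int × Int)) (W : List Int) (G : List (List (Int × Int)))
    (m : List Int) (e : Int) : List Int :=
  if PySem.List.pyGetD m e 0 ≠ -1 then m
  else if zE E W e > pvLIM then PySem.List.pySetD m e 0
  else PySem.List.pySetD m e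
    ((PySem.List.pyGetD G (PySem.List.pyGetD E e (0, 0)).2 []).foldl
      (fun s q =>
        if PySem.List.pyGetD W q.1 0 = zE E W e then
          PySem.Int.mod (s + 1 + PySem.List.pyGetD m q.2 0) pvMOD
        else s) 0)

theorem pv_foldl_congr {α β : Type} (l : List α) (f g : β → α → β)
    (h : ∀ s q, q ∈ l → f s q = g s q) : ∀ s, l.foldl f s = l.foldl g s := by
  induction l with
  | nil => intro s; rfl
  | cons q l ih =>
    intro s
    simp only [List.foldl_cons]
    rw [h s q (by simp)]
    exact ih (fun s q hq => h s q (List.mem_cons_of_mem _ hq)) _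

theorem pvAlt_key (E : List (Int × Int)) (W : List Int) (G : List (List (Int × Int))) (m0 : List Int)
    (hGW : G.length = W.length)
    (hE : ∀ p ∈ E, PySem.Raise.InRange W.length p.1 ∧ PySem.Raise.InRange W.length p.2)
    (hG : ∀ g ∈ G, ∀ q ∈ g, PySem.Raise.InRange W.length q.1 ∧ PySem.Raise.InRange E.length q.2)
    (hM : ∀ p ∈ E, ∀ q ∈ PySem.List.pyGetD G p.2 [],
      PySem.List.pyGetD W q.1 0 = PySem.List.pyGetD W p.1 0 + PySem.List.pyGetD W p.2 0 →
      zE E W q.2 > PySem.List.pyGetD W p.1 0 + PySem.List.pyGetD W p.2 0)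
    (hWb : ∀ w ∈ W, -2147483648 ≤ w ∧ w ≤ 2147483648)
    (hmE : m0.length = E.length) :
    ∀ (l : List Int) (m : List Int),
      (∀ i ∈ l, 0 ≤ i ∧ i < (E.length : Int)) →
      l.Pairwise (fun a b => zE E W b ≤ zE E W a) →
      pvGood E W G m0 m →
      (∀ k : Nat, k < E.length → ((k : Int) ∈ l ∨ m.getD k 0 ≠ -1)) →
      pvGood E W G m0 (l.foldl (pvStepB E W G) m) ∧
      (∀ k : Nat, k < E.length → (l.foldl (pvStepB E W G) m).getD k 0 ≠ -1) := by
  intro l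
  induction l with
  | nil =>
    intro m _ _ hg hcov
    exact ⟨hg, fun k hk => (hcov k hk).resolve_left (by simp)⟩
  | cons e l ih =>
    intro m hmem hpair hg hcov
    obtain ⟨he0, heN⟩ := hmem e (List.mem_cons_self)
    have heIR : PySem.Raise.InRange E.length e := ⟨by omega, heN⟩
    have hml : m.length = E.length := hg.1.trans hmE
    have posE : pvPos E.length e = e.toNat := by unfold pvPos; rw [if_pos he0]
    have hposE : e.toNat < E.length := by omega
    have hbm : PySem.List.pyGetD m e 0 = m.getD e.toNat 0 := by
      rw [pv_getD_py m e 0 (by rw [hml]; exact heIR), hml, posE]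
    have hmemT : ∀ i ∈ l, 0 ≤ i ∧ i < (E.length : Int) :=
      fun i hi => hmem i (List.mem_cons_of_mem _ hi)
    have hpairT := (List.pairwise_cons.mp hpair).2
    have hpairH := (List.pairwise_cons.mp hpair).1
    simp only [List.foldl_cons]
    by_cases hset : PySem.List.pyGetD m e 0 ≠ -1
    · have hstep : pvStepB E W G m e = m := by unfold pvStepB; rw [if_pos hset]
      rw [hstep]
      refine ih m hmemT hpairT hg ?_
      intro k hk
      rcases hcov k hk with hin | hs
      · rcases List.mem_cons.mp hin with heq | hin'
        · right
          have hke : k = e.toNat := by omega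
          rw [hke, ← hbm]
          exact hset
        · exact Or.inl hin'
      · exact Or.inr hs
    · push Not at hset
      have hmge : m.getD e.toNat 0 = -1 := by rw [← hbm]; exact hset
      have heIRn : PySem.Raise.InRange E.length ((e.toNat : Nat) : Int) := by
        constructor <;> [omega; exact_mod_cast hposE]
      have hm0e : PySem.List.pyGetD m0 e 0 = -1 := by
        rcases hg.2 e.toNat (by omega) with h | h
        · rw [pv_getD_py m0 e 0 (by rw [hmE]; exact heIR), hmE, posE, ← h]
          exact hmge
        · exact absurd (by rw [← h]; exact hmge)
            (pvValue_ne_neg_one E W G m0 hGW hE hG hM hWb _ heIRn)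
      have hnorme : pvValue E W G m0 ((e.toNat : Nat) : Int) = pvValue E W G m0 e := by
        have := pvValue_norm E W G m0 hmE e heIR
        rw [posE] at this
        exact this.symm
      have hrec := pvValue_rec E W G m0 hGW hE hG hM hWb e heIR
      rw [if_neg (by simp [hm0e])] at hrec
      have hcov' : ∀ (mnew : List Int), mnew = m.set e.toNat (pvValue E W G m0 e) →
          ∀ k : Nat, k < E.length → ((k : Int) ∈ l ∨ mnew.getD k 0 ≠ -1) := by
        intro mnew hmn k hk
        rcases hcov k hk with hin | hs
        · rcases List.mem_cons.mp hin with heq | hin'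
          · right
            have hke : k = e.toNat := by omega
            rw [hmn, hke, List.getD_eq_getElem?_getD, List.getElem?_set, if_pos rfl,
                if_pos (by omega)]
            simpa using pvValue_ne_neg_one E W G m0 hGW hE hG hM hWb e heIR
          · exact Or.inl hin'
        · right
          by_cases hke : e.toNat = k
          · rw [hmn, ← hke, List.getD_eq_getElem?_getD, List.getElem?_set, if_pos rfl,
                if_pos (by omega)]
            simpa using pvValue_ne_neg_one E W G m0 hGW hE hG hM hWb e heIR
          · rw [hmn, List.getD_eq_getElem?_getD, List.getElem?_set, if_neg hke,
                ← List.getD_eq_getElem?_getD]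
            exact hs
      by_cases hz : zE E W e > pvLIM
      · rw [if_pos hz] at hrec
        have hstep : pvStepB E W G m e = m.set e.toNat (pvValue E W G m0 e) := by
          unfold pvStepB
          rw [if_neg (by simp [hset]), if_pos hz,
              pv_setD_py m e 0 (by rw [hml]; exact heIR), hml, posE, hrec]
        rw [hstep]
        exact ih _ hmemT hpairT
          (pvGood_set E W G m0 m hmE hg _ hposE _ (by rw [hnorme]))
          (hcov' _ rfl)
      · rw [if_neg hz] at hrec
        have hchild : ∀ q ∈ PySem.List.pyGetD G (PySem.List.pyGetD E e (0, 0)).2 [],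
            PySem.List.pyGetD W q.1 0 = zE E W e →
            PySem.List.pyGetD m q.2 0 = pvValue E W G m0 q.2 := by
          intro q hq hcq
          obtain ⟨hq1, hq2, hq3⟩ := pv_child_facts E W G hGW hE hG hM e heIR q hq
          have hzgt := hq3 hcq
          have hposQ := pvPos_lt E.length q.2 hq2
          have hQIR : PySem.Raise.InRange E.length ((pvPos E.length q.2 : Nat) : Int) := by
            constructor <;> [omega; exact_mod_cast hposQ]
          have hzQ : zE E W q.2 = zE E W ((pvPos E.length q.2 : Nat) : Int) :=
            zE_norm E W q.2 hq2
          have hnotin : ((pvPos E.length q.2 : Nat) : Int) ∉ e :: l := by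
            intro hmem'
            rcases List.mem_cons.mp hmem' with heq | hin'
            · rw [heq] at hzQ
              omega
            · have := hpairH _ hin'
              rw [← hzQ] at this
              omega
          have hsetQ : m.getD (pvPos E.length q.2) 0 ≠ -1 := by
            rcases hcov (pvPos E.length q.2) hposQ with hin | hs
            · exact absurd hin hnotin
            · exact hs
          have hval := pvGood_entry E W G m0 m hGW hE hG hM hWb hmE hg _ hposQ hsetQ
          have hbq : PySem.List.pyGetD m q.2 0 = m.getD (pvPos E.length q.2) 0 := by
            rw [pv_getD_py m q.2 0 (by rw [hml]; exact hq2), hml]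
          rw [hbq, hval, ← pvValue_norm E W G m0 hmE q.2 hq2]
        have hS : (PySem.List.pyGetD G (PySem.List.pyGetD E e (0, 0)).2 []).foldl
            (fun s q =>
              if PySem.List.pyGetD W q.1 0 = zE E W e then
                PySem.Int.mod (s + 1 + PySem.List.pyGetD m q.2 0) pvMOD
              else s) 0 = pvValue E W G m0 e := by
          rw [hrec]
          refine pv_foldl_congr _ _ _ ?_ 0
          intro s q hq
          by_cases hc : PySem.List.pyGetD W q.1 0 = zE E W e
          · rw [if_pos hc, if_pos hc, hchild q hq hc]
          · rw [if_neg hc, if_neg hc]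
        have hstep : pvStepB E W G m e = m.set e.toNat (pvValue E W G m0 e) := by
          unfold pvStepB
          rw [if_neg (by simp [hset]), if_neg hz, hS,
              pv_setD_py m e _ (by rw [hml]; exact heIR), hml, posE]
        rw [hstep]
        exact ih _ hmemT hpairT
          (pvGood_set E W G m0 m hmE hg _ hposE _ (by rw [hnorme]))
          (hcov' _ rfl)

theorem dpAlt_main (ei : Int) (E : List (Int × Int)) (W : List Int) (G : List (List (Int × Int))) (m0 : List Int)
    (hGW : G.length = W.length)
    (hE : ∀ p ∈ E, PySem.Raise.InRange W.length p.1 ∧ PySem.Raise.InRange W.length p.2)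
    (hG : ∀ g ∈ G, ∀ q ∈ g, PySem.Raise.InRange W.length q.1 ∧ PySem.Raise.InRange E.length q.2)
    (hM : ∀ p ∈ E, ∀ q ∈ PySem.List.pyGetD G p.2 [],
      PySem.List.pyGetD W q.1 0 = PySem.List.pyGetD W p.1 0 + PySem.List.pyGetD W p.2 0 →
      zE E W q.2 > PySem.List.pyGetD W p.1 0 + PySem.List.pyGetD W p.2 0)
    (hWb : ∀ w ∈ W, -2147483648 ≤ w ∧ w ≤ 2147483648)
    (hmE : m0.length = E.length)
    (hei : PySem.Raise.InRange E.length ei) :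
    dp_alt ei E W G m0 = pvValue E W G m0 ei := by
  by_cases hhit : PySem.List.pyGetD m0 ei 0 ≠ -1
  · unfold dp_alt
    rw [if_pos hhit]
    have hrec := pvValue_rec E W G m0 hGW hE hG hM hWb ei hei
    rw [if_pos hhit] at hrec
    exact hrec.symm
  · unfold dp_alt
    rw [if_neg hhit]
    show PySem.List.pyGetD
        ((PySem.List.sorted (PySem.List.pyRange 0 (E.length : Int) 1)
          (fun i => -(zE E W i)) false).foldl (pvStepB E W G) m0) ei 0
        = pvValue E W G m0 ei
    have hperm := PySem.List.sorted_perm (PySem.List.pyRange 0 (E.length : Int) 1)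
      (fun i => -(zE E W i)) false
    have hmem : ∀ i ∈ PySem.List.sorted (PySem.List.pyRange 0 (E.length : Int) 1)
        (fun i => -(zE E W i)) false, 0 ≤ i ∧ i < (E.length : Int) := by
      intro i hi
      have := hperm.mem_iff.mp hi
      exact PySem.List.mem_pyRange_one.mp this
    have hpair : (PySem.List.sorted (PySem.List.pyRange 0 (E.length : Int) 1)
        (fun i => -(zE E W i)) false).Pairwise (fun a b => zE E W b ≤ zE E W a) := by
      have := PySem.List.sorted_pairwise (PySem.List.pyRange 0 (E.length : Int) 1)
        (fun i => -(zE E W i))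
      exact this.imp (fun {a b} h => by omega)
    have hcov : ∀ k : Nat, k < E.length →
        ((k : Int) ∈ PySem.List.sorted (PySem.List.pyRange 0 (E.length : Int) 1)
          (fun i => -(zE E W i)) false ∨ m0.getD k 0 ≠ -1) := by
      intro k hk
      left
      rw [hperm.mem_iff]
      exact PySem.List.mem_pyRange_one.mpr ⟨by omega, by exact_mod_cast hk⟩
    obtain ⟨hgF, hsF⟩ := pvAlt_key E W G m0 hGW hE hG hM hWb hmE _ m0 hmem hpair
      ⟨rfl, fun k hk => Or.inl rfl⟩ hcov
    have hlF : ((PySem.List.sorted (PySem.List.pyRange 0 (E.length : Int) 1)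
        (fun i => -(zE E W i)) false).foldl (pvStepB E W G) m0).length = E.length :=
      hgF.1.trans hmE
    have hposei := pvPos_lt E.length ei hei
    rw [pv_getD_py _ ei 0 (by rw [hlF]; exact hei), hlF]
    rw [pvGood_entry E W G m0 _ hGW hE hG hM hWb hmE hgF _ hposei (hsF _ hposei)]
    exact (pvValue_norm E W G m0 hmE ei hei).symm

theorem dp_spec : Claim_equal_dp := by
  intro ei E W G memo hDom hPre
  unfold Spec_dp
  obtain ⟨heim, hPre⟩ := hPre
  have hF : pvFUEL = 68719476735 + 1 := by norm_num [pvFUEL]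
  rcases hPre with hhit | ⟨hei, hmE, hGW, hE, hG, hM⟩
  · unfold dp dp_alt
    rw [hF, dpGo_succ, if_pos hhit, if_pos hhit]
  have hWb : ∀ w ∈ W, -2147483648 ≤ w ∧ w ≤ 2147483648 := by
    simp only [Dom_dp, Bool.and_eq_true, List.all_eq_true, pvDomInt, decide_eq_true_eq] at hDom
    exact fun w hw => hDom.1.1.2 w hw
  have hneed : pvNeed E W ei < pvFUEL := by
    have := pvNeed_bound E W hWb hE ei hei
    norm_num [pvFUEL]
    omega
  obtain ⟨m', hrun, _⟩ := dpGo_main E W G memo hGW hE hG hM hWb hmE pvFUEL ei memo hei hneed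
    ⟨rfl, fun k hk => Or.inl rfl⟩
  unfold dp
  rw [hrun, dpAlt_main ei E W G memo hGW hE hG hM hWb hmE hei]
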